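-- pv_equiv track=rewrite | github.com/achmad-irfan/tennis-score-simulation-app | TennisSkor/score.py | agregat_all_stat
-- ===== SOURCE A (Python) =====
-- table_match_stats = [
--     {"key": "ace", "label": "Ace"},
--     {"key": "double_fault", "label": "Double Fault"},
--     {"type": "separator"},
--     {"key": "first_serve_total", "label": "First Serve",  "pair": "total_service" },
--     {"key": "first_serve_win", "label": "First Serve Win", "pair" :"first_serve_total"},
--     {"key": "second_serve_win", "label": "Second Serve Win", "pair": "second_serve_total"},
--     {"type": "separator"},
--     {"key": "return_point_win", "label": "Return Point", "pair": "return_point"},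
--     {"key": "break_point_win", "label": "Break Point", "pair": "break_point"},
--     {"type": "separator"},
--     {"key": "winner", "label": "Winner"},
--     {"key": "forced_error", "label": "Forced Error"},
--     {"key": "unforced_error", "label": "Unforced Error"},
--     {"key": "total_point", "label": "Total Point"},
-- ]
--
-- def agregat_all_stat(data, player):
--     result = {}
--
--     for stat in table_match_stats:
--         if "key" not in stat:
--             continue
--
--         key = stat["key"]
--         result[key] = sum(item[player].get(key, 0) for item in data)
--
--         if "pair" in stat:
--             pair = stat["pair"]
--             if pair not in result:
--                 result[pair] = sum(item[player].get(pair, 0) for item in data)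
--
--     return result
-- ===== SOURCE B (Python) =====
-- # B: fixed key list + one pass over data accumulating all stats at once
-- # (A re-sums the whole data list per key: 15 passes; B does one pass).
-- _KEYS = [
--     "ace", "double_fault",
--     "first_serve_total", "total_service", "first_serve_win",
--     "second_serve_win", "second_serve_total",
--     "return_point_win", "return_point",
--     "break_point_win", "break_point",
--     "winner", "forced_error", "unforced_error", "total_point",
-- ]
--
-- def agregat_all_stat(data, player):
--     totals = [0] * len(_KEYS)
--     for item in data:
--         p = item[player]
--         for i, k in enumerate(_KEYS):
--             totals[i] += p.get(k, 0)
--     return dict(zip(_KEYS, totals))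
-- ===== Notes on version B (the rewrite author's own statement) =====
-- stated objective: faster
-- what changed: B replaces A's per-key re-scan of data (one sum(...) generator pass per key, plus pair re-sums) with a fixed literal key list and a single pass over data that accumulates all 15 totals simultaneously.
import Mathlib
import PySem

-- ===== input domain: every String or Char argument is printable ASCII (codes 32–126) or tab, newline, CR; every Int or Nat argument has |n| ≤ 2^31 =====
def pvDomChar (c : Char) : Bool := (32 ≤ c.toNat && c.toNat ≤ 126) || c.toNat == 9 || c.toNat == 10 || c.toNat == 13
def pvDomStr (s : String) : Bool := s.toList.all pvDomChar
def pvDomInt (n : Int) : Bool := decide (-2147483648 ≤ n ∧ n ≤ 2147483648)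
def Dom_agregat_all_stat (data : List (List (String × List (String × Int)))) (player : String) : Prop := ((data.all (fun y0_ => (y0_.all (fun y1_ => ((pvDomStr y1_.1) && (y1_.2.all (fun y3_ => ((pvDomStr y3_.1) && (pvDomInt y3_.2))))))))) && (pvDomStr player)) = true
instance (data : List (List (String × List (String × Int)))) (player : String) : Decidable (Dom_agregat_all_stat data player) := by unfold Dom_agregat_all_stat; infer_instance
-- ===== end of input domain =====

-- B replaces A's per-key re-scan of data (one sum() pass per stat key) with a fixed
-- key list and one pass over data accumulating all totals at once (objective: faster, constant factor).

-- ===== PORT A =====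
-- the module-level table; entries are Python dicts with string values
def tableMatchStats : List (PySem.Dict String String) :=
  [ PySem.Dict.mk [("key", "ace"), ("label", "Ace")],
    PySem.Dict.mk [("key", "double_fault"), ("label", "Double Fault")],
    PySem.Dict.mk [("type", "separator")],
    PySem.Dict.mk [("key", "first_serve_total"), ("label", "First Serve"), ("pair", "total_service")],
    PySem.Dict.mk [("key", "first_serve_win"), ("label", "First Serve Win"), ("pair", "first_serve_total")],
    PySem.Dict.mk [("key", "second_serve_win"), ("label", "Second Serve Win"), ("pair", "second_serve_total")],
    PySem.Dict.mk [("type", "separator")],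
    PySem.Dict.mk [("key", "return_point_win"), ("label", "Return Point"), ("pair", "return_point")],
    PySem.Dict.mk [("key", "break_point_win"), ("label", "Break Point"), ("pair", "break_point")],
    PySem.Dict.mk [("type", "separator")],
    PySem.Dict.mk [("key", "winner"), ("label", "Winner")],
    PySem.Dict.mk [("key", "forced_error"), ("label", "Forced Error")],
    PySem.Dict.mk [("key", "unforced_error"), ("label", "Unforced Error")],
    PySem.Dict.mk [("key", "total_point"), ("label", "Total Point")] ]

-- sum(item[player].get(key, 0) for item in data); item[player] raises KeyError when the
-- item lacks the player (excluded by Pre_), so the total form defaults that lookup to {}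
def sumStat (data : List (List (String × List (String × Int)))) (player key : String) : Int :=
  data.foldl (fun s item =>
    s + (PySem.Dict.mk (((PySem.Dict.mk item).get? player).getD [])).getD key 0) 0

def agregat_all_stat (data : List (List (String × List (String × Int)))) (player : String) : List (String × Int) :=
  (tableMatchStats.foldl (fun result stat =>
    if !(stat.contains "key") then result
    else
      let key := stat.getD "key" ""
      let result := result.insert key (sumStat data player key)
      if stat.contains "pair" then
        let pair := stat.getD "pair" ""
        if !(result.contains pair) then result.insert pair (sumStat data player pair)
        else result
      else result) PySem.Dict.empty).items

-- ===== PORT B =====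
def keysB : List String :=
  [ "ace", "double_fault",
    "first_serve_total", "total_service", "first_serve_win",
    "second_serve_win", "second_serve_total",
    "return_point_win", "return_point",
    "break_point_win", "break_point",
    "winner", "forced_error", "unforced_error", "total_point" ]

def agregat_all_stat_alt (data : List (List (String × List (String × Int)))) (player : String) : List (String × Int) :=
  let totals := data.foldl (fun totals item =>
      let p := PySem.Dict.mk (((PySem.Dict.mk item).get? player).getD [])
      List.zipWith (fun t k => t + p.getD k 0) totals keysB)
    (keysB.map (fun _ => (0 : Int)))
  (PySem.Dict.ofList (keysB.zip totals)).items

-- ===== PRECONDITION & SPEC =====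
-- excludes exactly the inputs where item[player] raises KeyError in A
def Pre_agregat_all_stat (data : List (List (String × List (String × Int)))) (player : String) : Prop :=
  ∀ item ∈ data, (PySem.Dict.mk item).contains player = true
instance (data : List (List (String × List (String × Int)))) (player : String) : Decidable (Pre_agregat_all_stat data player) := by unfold Pre_agregat_all_stat; infer_instance

def pvWitness_agregat_all_stat : (List (List (String × List (String × Int)))) × String :=
  ([[("p", [("ace", 3), ("winner", 1)])], [("p", [("ace", 2)])]], "p")

def Spec_agregat_all_stat (data : List (List (String × List (String × Int)))) (player : String) (out : List (String × Int)) : Prop := out = agregat_all_stat_alt data player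
instance (data : List (List (String × List (String × Int)))) (player : String) (out : List (String × Int)) : Decidable (Spec_agregat_all_stat data player out) := by unfold Spec_agregat_all_stat; infer_instance

-- ===== CLAIM (what is proved, stated in full; the proofs are below) =====
def Claim_equal_agregat_all_stat : Prop := ∀ (data : List (List (String × List (String × Int)))) (player : String), Dom_agregat_all_stat data player → Pre_agregat_all_stat data player → Spec_agregat_all_stat data player (agregat_all_stat data player)

-- ===== LEMMAS AND PROOFS =====

-- A's fold over the literal table evaluates to the 15 keys in insertion order, each with its sum
set_option maxHeartbeats 1000000 in
lemma A_eq_map (data : List (List (String × List (String × Int)))) (player : String) :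
    agregat_all_stat data player = keysB.map (fun k => (k, sumStat data player k)) := by
  simp [agregat_all_stat, tableMatchStats, keysB, PySem.Dict.contains_mk,
    PySem.Dict.get?_mk_cons, PySem.Dict.getD_eq_get?_getD, PySem.Dict.contains_insert,
    PySem.Dict.items_insert, PySem.Dict.empty]

lemma zipWith_map_left {α γ : Type} (g : γ → α → γ) (f : α → γ) (ks : List α) :
    List.zipWith (fun t k => g t k) (ks.map f) ks = ks.map (fun k => g (f k) k) := by
  induction ks with
  | nil => rfl
  | cons k ks ih => simp [ih]

-- invariant of B's single pass: starting from ks.map f, the totals stay a map over ks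
lemma B_fold_inv (player : String) (ks : List String)
    (data : List (List (String × List (String × Int)))) (f : String → Int) :
    data.foldl (fun totals item =>
        let p := PySem.Dict.mk (((PySem.Dict.mk item).get? player).getD [])
        List.zipWith (fun t k => t + p.getD k 0) totals ks) (ks.map f)
      = ks.map (fun k => f k + sumStat data player k) := by
  induction data generalizing f with
  | nil => simp [sumStat]
  | cons item data ih =>
    simp only [List.foldl_cons]
    rw [zipWith_map_left _ f ks, ih]
    apply List.map_congr_left
    intro k _
    simp [sumStat, PySem.List.foldl_add]
    ring

set_option maxHeartbeats 1000000 in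
lemma B_eq_map (data : List (List (String × List (String × Int)))) (player : String) :
    agregat_all_stat_alt data player = keysB.map (fun k => (k, sumStat data player k)) := by
  unfold agregat_all_stat_alt
  rw [B_fold_inv player keysB data (fun _ => 0)]
  simp [keysB, PySem.Dict.ofList, PySem.Dict.update, PySem.Dict.items_insert,
    PySem.Dict.contains_insert, PySem.Dict.contains_mk, PySem.Dict.empty]

-- ===== VERDICT (by name: the statement is the Claim_ definition above) =====
theorem agregat_all_stat_spec : Claim_equal_agregat_all_stat := by
  intro data player _ _
  unfold Spec_agregat_all_stat
  rw [A_eq_map, B_eq_map]
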